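-- pv_equiv track=rewrite | github.com/PratikD7/CS-6140-Machine-Learning | Assignment 3/Task2.4.3- Part2.py | get_Li
-- ===== SOURCE A (Python) =====
-- def get_Li(data, N):
--     Li = [[] for i in range(N)]
--
--     for row in data:
--         Li[row[0]-1].append(row[2])
--
--     counter = 0
--     for l in Li:
--         Li[counter] = sum(l)
--         counter+=1
--
--     return Li
-- ===== SOURCE B (Python) =====
-- def get_Li(data, N):
--     Li = [0] * N
--     for row in data:
--         Li[row[0] - 1] += row[2]
--     return Li
-- ===== Notes on version B (the rewrite author's own statement) =====
-- stated objective: simpler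
-- what changed: B keeps a list of running-sum accumulators and adds row[2] into bucket row[0]-1 in a single pass, instead of A's two passes that first collect each bucket's values in a list of lists and then replace each list by its sum.
import Mathlib
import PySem

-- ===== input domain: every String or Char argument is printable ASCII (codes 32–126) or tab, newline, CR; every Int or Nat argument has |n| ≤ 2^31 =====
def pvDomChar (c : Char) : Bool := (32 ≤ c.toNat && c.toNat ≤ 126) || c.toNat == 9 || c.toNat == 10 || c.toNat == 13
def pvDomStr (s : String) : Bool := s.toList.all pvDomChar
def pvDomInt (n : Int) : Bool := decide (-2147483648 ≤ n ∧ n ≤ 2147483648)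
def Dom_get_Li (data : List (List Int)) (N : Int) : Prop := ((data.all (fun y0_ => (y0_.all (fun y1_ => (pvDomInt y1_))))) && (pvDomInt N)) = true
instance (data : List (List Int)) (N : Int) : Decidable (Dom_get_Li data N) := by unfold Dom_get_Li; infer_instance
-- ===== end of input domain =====

-- B replaces A's collect-then-sum (a list of value-lists, then a second reduction pass) by a
-- single pass maintaining numeric accumulators. Equivalence is proved on all inputs where A
-- returns (Pre_get_Li); A mutates no caller-visible data.

-- ===== PORT A =====
-- Python's second loop rewrites Li[counter] (the element just read) to sum(l) while iterating;
-- since lists are homogeneous in Lean, that in-place pass is transcribed as the same left-to-right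
-- pass accumulating the rewritten prefix in an output list (exact: positions not yet visited are
-- never read after being written).
def get_Li (data : List (List Int)) (N : Int) : List Int :=
  let Li0 : List (List Int) := (PySem.List.pyRange 0 N 1).map (fun _ => [])
  let Li := data.foldl (fun Li row =>
      PySem.List.pySetD Li (PySem.List.pyGetD row 0 0 - 1)
        (PySem.List.pyGetD Li (PySem.List.pyGetD row 0 0 - 1) [] ++ [PySem.List.pyGetD row 2 0])) Li0
  Li.foldl (fun acc l => acc ++ [l.sum]) []

-- ===== PORT B =====
def get_Li_alt (data : List (List Int)) (N : Int) : List Int :=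
  data.foldl (fun Li row =>
      PySem.List.pySetD Li (PySem.List.pyGetD row 0 0 - 1)
        (PySem.List.pyGetD Li (PySem.List.pyGetD row 0 0 - 1) 0 + PySem.List.pyGetD row 2 0))
    (PySem.List.pyRepeat [0] N)

-- ===== PRECONDITION & SPEC =====
-- Exactly the inputs on which the Python A returns (no IndexError): every row has at least 3
-- elements and its bucket index row[0]-1 is a valid (possibly negative) Python index into the
-- N-element list. The equivalence proof itself holds without it; Pre_ only delimits where the
-- ports model the Python (elsewhere both Pythons raise).
def Pre_get_Li (data : List (List Int)) (N : Int) : Prop :=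
  ∀ row ∈ data, 3 ≤ row.length ∧ PySem.Raise.InRange N.toNat (row.getD 0 0 - 1)
instance (data : List (List Int)) (N : Int) : Decidable (Pre_get_Li data N) := by unfold Pre_get_Li; infer_instance

def pvWitness_get_Li : List (List Int) × Int := ([[1, 0, 5], [2, 0, 3], [1, 0, 7]], 2)

def Spec_get_Li (data : List (List Int)) (N : Int) (out : List Int) : Prop := out = get_Li_alt data N
instance (data : List (List Int)) (N : Int) (out : List Int) : Decidable (Spec_get_Li data N out) := by unfold Spec_get_Li; infer_instance

-- ===== CLAIM (what is proved, stated in full; the proofs are below) =====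
def Claim_equal_get_Li : Prop := ∀ (data : List (List Int)) (N : Int), Dom_get_Li data N → Pre_get_Li data N → Spec_get_Li data N (get_Li data N)

-- ===== LEMMAS AND PROOFS =====

-- a normalized index produced by pyIdx? is in range
lemma pyIdx?_lt {n : Nat} {i : Int} {k : Nat} (h : PySem.List.pyIdx? n i = some k) : k < n := by
  unfold PySem.List.pyIdx? at h
  split_ifs at h <;> simp_all <;> omega

-- mapping List.sum over one A-step equals one B-step on the mapped state
lemma map_sum_step (Li : List (List Int)) (i x : Int) :
    (PySem.List.pySetD Li i (PySem.List.pyGetD Li i [] ++ [x])).map List.sum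
      = PySem.List.pySetD (Li.map List.sum) i (PySem.List.pyGetD (Li.map List.sum) i 0 + x) := by
  cases h : PySem.List.pyIdx? Li.length i with
  | none =>
      simp [PySem.List.pySetD, PySem.List.pySet?, PySem.List.pyGetD, PySem.List.pyGet?, h]
  | some k =>
      have hk : k < Li.length := pyIdx?_lt h
      simp [PySem.List.pySetD, PySem.List.pySet?, PySem.List.pyGetD, PySem.List.pyGet?, h,
        hk, List.map_set]

-- mapping List.sum over A's accumulation loop equals B's loop on the mapped initial state
lemma fold_comm (data : List (List Int)) : ∀ Li : List (List Int),
    (data.foldl (fun Li row =>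
        PySem.List.pySetD Li (PySem.List.pyGetD row 0 0 - 1)
          (PySem.List.pyGetD Li (PySem.List.pyGetD row 0 0 - 1) [] ++ [PySem.List.pyGetD row 2 0])) Li).map List.sum
      = data.foldl (fun Li row =>
          PySem.List.pySetD Li (PySem.List.pyGetD row 0 0 - 1)
            (PySem.List.pyGetD Li (PySem.List.pyGetD row 0 0 - 1) 0 + PySem.List.pyGetD row 2 0)) (Li.map List.sum) := by
  induction data with
  | nil => intro Li; rfl
  | cons row rest ih =>
      intro Li
      simp only [List.foldl_cons]
      rw [← map_sum_step, ih]

theorem get_Li_spec_total (data : List (List Int)) (N : Int) : get_Li data N = get_Li_alt data N := by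
  unfold get_Li get_Li_alt
  rw [PySem.List.foldl_append_singleton_eq_map, List.nil_append, fold_comm,
    PySem.List.pyRepeat_singleton]
  congr 1
  rw [List.map_map]
  have : ((PySem.List.pyRange 0 N 1).map (List.sum ∘ fun _ => ([] : List Int)))
      = (PySem.List.pyRange 0 N 1).map (fun _ => (0 : Int)) := rfl
  rw [this, List.map_const', PySem.List.length_pyRange_one]
  simp

-- ===== VERDICT (by name: the statement is the Claim_ definition above) =====
theorem get_Li_spec : Claim_equal_get_Li := by
  intro data N _ _
  unfold Spec_get_Li
  exact get_Li_spec_total data N
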